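-- pv_equiv track=rewrite | github.com/ilmagita/kripto-tugas-2 | ciphers/playfair.py | str_to_playfair_bigram_list
-- ===== SOURCE A (Python) =====
-- def str_to_playfair_bigram_list(string, substitute_ch='X'):
--     """
--     Function to arrange plaintext to an array of bigrams intended for Playfair cipher.
--     """
--
--     # handle repeating letters in a bigram - insert substitute character between
--     new_string = [ord(char) for char in string]
--     bigram_check_list = []
--     i = 0
--
--     while i < (len(new_string)):
--         el = [0, 0]
--         bigram = new_string[i:i+2]
--
--         if i < len(new_string) - 1:
--             if bigram[0] == bigram[1]:
--                 el[0] = bigram[0]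
--                 el[1] = ord(substitute_ch)
--
--                 i = i + 1
--             else:
--                 el[0] = bigram[0]
--                 el[1] = bigram[1]
--
--                 i = i + 2
--         else:
--             el[0] = bigram[0]
--             el[1] = ord(substitute_ch)
--
--             i = i + 1
--
--         bigram_check_list.append(el)
--
--     return bigram_check_list
-- ===== SOURCE B (Python) =====
-- def str_to_playfair_bigram_list(string, substitute_ch='X'):
--     """Single forward pass keeping one 'pending' first element instead of an index with slice lookahead."""
--     result = []
--     pending = None
--     for char in string:
--         c = ord(char)
--         if pending is None:
--             pending = c
--         elif pending == c:
--             result.append([pending, ord(substitute_ch)])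
--             pending = c
--         else:
--             result.append([pending, c])
--             pending = None
--     if pending is not None:
--         result.append([pending, ord(substitute_ch)])
--     return result
-- ===== Notes on version B (the rewrite author's own statement) =====
-- stated objective: alternative
-- what changed: Replaced the index-jumping while loop with slice lookahead (i advances by 1 or 2, reading string[i:i+2]) by a single forward pass over the characters maintaining one 'pending' first element, with a final tail pad after the loop.
import Mathlib
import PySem

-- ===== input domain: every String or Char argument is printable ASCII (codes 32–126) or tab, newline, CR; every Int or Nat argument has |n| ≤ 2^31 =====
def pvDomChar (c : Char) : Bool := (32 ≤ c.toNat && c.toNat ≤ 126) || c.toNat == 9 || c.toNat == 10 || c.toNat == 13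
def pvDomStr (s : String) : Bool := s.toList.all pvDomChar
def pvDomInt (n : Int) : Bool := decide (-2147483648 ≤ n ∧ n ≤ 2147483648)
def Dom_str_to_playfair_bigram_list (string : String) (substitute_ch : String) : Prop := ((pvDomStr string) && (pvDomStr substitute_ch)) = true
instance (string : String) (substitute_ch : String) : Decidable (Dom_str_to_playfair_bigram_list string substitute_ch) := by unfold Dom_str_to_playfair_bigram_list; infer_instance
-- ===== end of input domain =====

-- B replaces A's index-jumping while loop (with a two-slice lookahead) by one forward pass
-- keeping a single 'pending' first element; same O(n) cost, different state and traversal.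

-- ===== PORT A =====
-- ord(s) for a 1-character string; only reached when Pre_ guarantees length 1 (else Python raises TypeError)
def pvOrd1 (s : String) : Int :=
  match s.toList with
  | [c] => (c.toNat : Int)
  | _ => 0

-- the while loop of A: i jumps by 1 or 2, bigram = new_string[i:i+2]
def pvALoop (xs : List Int) (sub : Int) (i : Nat) : List (List Int) :=
  if i < xs.length then
    let bigram := PySem.List.slice xs (some (i : Int)) (some ((i : Int) + 2))
    if i < xs.length - 1 then
      if bigram.getD 0 0 = bigram.getD 1 0 then   -- bigram[0] == bigram[1], both in range here
        [bigram.getD 0 0, sub] :: pvALoop xs sub (i + 1)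
      else
        [bigram.getD 0 0, bigram.getD 1 0] :: pvALoop xs sub (i + 2)
    else
      [bigram.getD 0 0, sub] :: pvALoop xs sub (i + 1)
  else []
termination_by xs.length - i

def str_to_playfair_bigram_list (string : String) (substitute_ch : String) : List (List Int) :=
  pvALoop (string.toList.map (fun c => (c.toNat : Int))) (pvOrd1 substitute_ch) 0

-- ===== PORT B =====
-- single forward pass with an optional pending first element (Source B)
def pvBLoop (sub : Int) : List Int → Option Int → List (List Int)
  | [], none => []
  | [], some p => [[p, sub]]
  | c :: rest, none => pvBLoop sub rest (some c)
  | c :: rest, some p =>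
      if p = c then [p, sub] :: pvBLoop sub rest (some c)
      else [p, c] :: pvBLoop sub rest none

def str_to_playfair_bigram_list_alt (string : String) (substitute_ch : String) : List (List Int) :=
  pvBLoop (pvOrd1 substitute_ch) (string.toList.map (fun c => (c.toNat : Int))) none

-- ===== PRECONDITION & SPEC =====
-- Pre_ excludes exactly the inputs on which Python A raises TypeError from ord(substitute_ch):
-- ord is reached unless substitute_ch has length 1, or the string has even length and no
-- repeated pair at an even boundary (so neither repeat-substitution nor tail padding occurs).
def Pre_str_to_playfair_bigram_list (string : String) (substitute_ch : String) : Prop :=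
  substitute_ch.toList.length = 1 ∨
  (string.toList.length % 2 = 0 ∧
    ∀ i ∈ List.range string.toList.length, i % 2 = 0 → string.toList[i]? ≠ string.toList[i+1]?)
instance (string : String) (substitute_ch : String) : Decidable (Pre_str_to_playfair_bigram_list string substitute_ch) := by unfold Pre_str_to_playfair_bigram_list; infer_instance
def pvWitness_str_to_playfair_bigram_list : String × String := ("AB", "X")

def Spec_str_to_playfair_bigram_list (string : String) (substitute_ch : String) (out : List (List Int)) : Prop := out = str_to_playfair_bigram_list_alt string substitute_ch
instance (string : String) (substitute_ch : String) (out : List (List Int)) : Decidable (Spec_str_to_playfair_bigram_list string substitute_ch out) := by unfold Spec_str_to_playfair_bigram_list; infer_instance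

-- ===== CLAIM (what is proved, stated in full; the proofs are below) =====
def Claim_equal_str_to_playfair_bigram_list : Prop := ∀ (string : String) (substitute_ch : String), Dom_str_to_playfair_bigram_list string substitute_ch → Pre_str_to_playfair_bigram_list string substitute_ch → Spec_str_to_playfair_bigram_list string substitute_ch (str_to_playfair_bigram_list string substitute_ch)

-- ===== LEMMAS AND PROOFS =====

-- The two loops agree: A's loop from index i equals B's pass over the tail xs.drop i
theorem pvLoop_agree (xs : List Int) (sub : Int) :
    ∀ i, pvALoop xs sub i = pvBLoop sub (xs.drop i) none := by
  have main : ∀ n i, xs.length - i ≤ n → pvALoop xs sub i = pvBLoop sub (xs.drop i) none := by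
    intro n
    induction n with
    | zero =>
        intro i h
        have hge : xs.length ≤ i := by omega
        rw [pvALoop]
        simp [Nat.not_lt.mpr hge, List.drop_of_length_le hge, pvBLoop]
    | succ n ih =>
        intro i h
        by_cases hi : i < xs.length
        · have hdrop : xs.drop i = xs[i] :: xs.drop (i + 1) :=
            (List.getElem_cons_drop hi).symm
          have hslice : PySem.List.slice xs (some (i : Int)) (some ((i : Int) + 2))
              = (xs.drop i).take 2 := by
            have := PySem.List.slice_natCast_add (xs := xs) (j := i) (n := 2)
            simpa using this
          by_cases hi1 : i < xs.length - 1
          · have hi1' : i + 1 < xs.length := by omega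
            have hdrop1 : xs.drop (i + 1) = xs[i+1] :: xs.drop (i + 2) :=
              (List.getElem_cons_drop hi1').symm
            have hbg : (xs.drop i).take 2 = [xs[i], xs[i+1]] := by
              rw [hdrop, hdrop1]; rfl
            have ih1 : pvALoop xs sub (i + 1) = pvBLoop sub (xs.drop (i + 2)) (some xs[i+1]) := by
              rw [ih (i + 1) (by omega), hdrop1]; simp only [pvBLoop]
            have ih2 := ih (i + 2) (by omega)
            rw [pvALoop, if_pos hi]
            simp only [hslice, hbg, List.getD_cons_zero, List.getD_cons_succ]
            rw [if_pos hi1]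
            conv_rhs => rw [hdrop, hdrop1]
            simp only [pvBLoop]
            by_cases heq : xs[i] = xs[i+1]
            · rw [if_pos heq, if_pos heq, ih1, heq]
            · rw [if_neg heq, if_neg heq, ih2]
          · -- last character: i = xs.length - 1
            have hlast : xs.length ≤ i + 1 := by omega
            have hdrop1 : xs.drop (i + 1) = [] := List.drop_of_length_le hlast
            have hbg : (xs.drop i).take 2 = [xs[i]] := by
              rw [hdrop, hdrop1]; rfl
            have ih1 : pvALoop xs sub (i + 1) = [] := by
              rw [ih (i + 1) (by omega), hdrop1]; simp only [pvBLoop]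
            rw [pvALoop, if_pos hi]
            simp only [hslice, hbg, List.getD_cons_zero]
            rw [if_neg hi1, ih1]
            conv_rhs => rw [hdrop, hdrop1]
            simp only [pvBLoop]
        · have hge : xs.length ≤ i := Nat.not_lt.mp hi
          rw [pvALoop]
          simp [hi, List.drop_of_length_le hge, pvBLoop]
  intro i
  exact main (xs.length - i) i le_rfl

-- ===== VERDICT (by name: the statement is the Claim_ definition above) =====
theorem str_to_playfair_bigram_list_spec : Claim_equal_str_to_playfair_bigram_list := by
  intro string substitute_ch _dom _pre
  unfold Spec_str_to_playfair_bigram_list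
  unfold str_to_playfair_bigram_list str_to_playfair_bigram_list_alt
  simpa using pvLoop_agree (string.toList.map (fun c => (c.toNat : Int))) (pvOrd1 substitute_ch) 0
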